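-- pv_equiv track=rewrite | github.com/UlrikTJ/Mathcad2LaTex | mathcad_to_latex.py | _process_nested_structures
-- ===== SOURCE A (Python) =====
-- def _process_nested_structures(latex):
--     """
--     Process LaTeX content with nested structures, ensuring correct spacing
--     in constructs like \sqrt{}, \frac{}, etc.
--
--     Args:
--         latex (str): The LaTeX expression
--
--     Returns:
--         str: Properly formatted LaTeX with correct spacing
--     """
--     # Track positions where we are in special constructs
--     i = 0
--     result = ""
--     brace_level = 0
--
--     # Known complete commands that shouldn't be split
--     complete_commands = ['int', 'sum', 'prod', 'lim', 'frac', 'sqrt', 'in']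
--
--     in_command = False
--     current_command = ""
--
--     while i < len(latex):
--         # Handle backslash commands
--         if latex[i] == '\\' and not in_command:
--             in_command = True
--             command_start = i
--             i += 1
--             current_command = ""
--             while i < len(latex) and latex[i].isalpha():
--                 current_command += latex[i]
--                 i += 1
--
--             # Add the command to the result
--             result += latex[command_start:command_start+len(current_command)+1]
--
--             # Skip anything that shouldn't have spaces added
--             if current_command in complete_commands:
--                 in_command = False
--             continue
--
--         # If we're inside a command but hit a non-alphabetic character, end the command
--         if in_command and (i >= len(latex) or not latex[i].isalpha()):
--             in_command = False
--
--             # If the next character is alphanumeric, add a space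
--             if i < len(latex) and latex[i].isalnum() and latex[i] not in ['{', '}', '(', ')', '[', ']', ' ']:
--                 result += " "
--
--         # Handle braces
--         if latex[i] == '{':
--             brace_level += 1
--         elif latex[i] == '}':
--             brace_level -= 1
--
--         # Add the current character
--         result += latex[i]
--         i += 1
--
--     return result
-- ===== SOURCE B (Python) =====
-- def _process_nested_structures(latex):
--     """Split-based rewrite: cut the string at backslashes and process each
--     chunk's leading command name, instead of walking a char-index state machine."""
--     complete_commands = ['int', 'sum', 'prod', 'lim', 'frac', 'sqrt', 'in']
--     chunks = latex.split('\\')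
--     out = [chunks[0]]
--     swallowed = False  # previous chunk ended a non-complete command right at the boundary
--     for ch in chunks[1:]:
--         out.append('\\')
--         if swallowed:
--             # this chunk's backslash was consumed as a plain character
--             out.append(ch)
--             swallowed = False
--             continue
--         k = next((j for j, c in enumerate(ch) if not c.isalpha()), len(ch))
--         cmd = ch[:k]
--         out.append(cmd)
--         if cmd in complete_commands:
--             out.append(ch[k:])
--         elif k < len(ch):
--             if ch[k].isdigit():
--                 out.append(' ')
--             out.append(ch[k:])
--         else:
--             swallowed = True
--     return ''.join(out)
-- ===== Notes on version B (the rewrite author's own statement) =====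
-- stated objective: alternative
-- what changed: Replaced the char-by-char index walk with an in_command state machine by splitting the string at backslashes once and processing each chunk's leading letter-run command with a swallowed-boundary flag.
import Mathlib
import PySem

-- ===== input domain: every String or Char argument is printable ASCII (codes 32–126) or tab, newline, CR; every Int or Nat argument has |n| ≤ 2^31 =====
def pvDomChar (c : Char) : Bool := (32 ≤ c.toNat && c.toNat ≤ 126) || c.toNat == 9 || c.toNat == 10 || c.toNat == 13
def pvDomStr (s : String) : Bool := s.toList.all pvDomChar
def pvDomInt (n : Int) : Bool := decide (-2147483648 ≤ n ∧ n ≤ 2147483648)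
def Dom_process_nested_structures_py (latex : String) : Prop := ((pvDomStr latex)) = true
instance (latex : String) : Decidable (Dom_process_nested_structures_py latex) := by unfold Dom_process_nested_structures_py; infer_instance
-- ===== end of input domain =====

-- B replaces A's char-by-char index/state-machine walk by splitting the string at backslashes
-- once and processing each chunk's leading command name (objective: alternative).


-- ===== PORT A =====

-- complete_commands = ['int', 'sum', 'prod', 'lim', 'frac', 'sqrt', 'in']
def pvCompleteA : List (List Char) :=
  ["int".toList, "sum".toList, "prod".toList, "lim".toList, "frac".toList, "sqrt".toList, "in".toList]

-- A's while-loop: state i (kept as the remaining suffix `rest`), result, brace_level, in_command;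
-- the inner `while … isalpha` is takeWhile/dropWhile; latex[command_start:command_start+len+1]
-- is exactly '\' + current_command.
def pvALoop (rest : List Char) (result : List Char) (braceLevel : Int) (inCommand : Bool) :
    List Char :=
  match rest with
  | [] => result
  | c :: rs =>
    if c == '\\' && !inCommand then
      let cmd := rs.takeWhile PySem.Chars.isalpha
      let rest' := rs.dropWhile PySem.Chars.isalpha
      let result' := result ++ '\\' :: cmd
      if cmd ∈ pvCompleteA then pvALoop rest' result' braceLevel false
      else pvALoop rest' result' braceLevel true
    else
      let result1 :=
        if inCommand && !(PySem.Chars.isalpha c) &&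
            (PySem.Chars.isalnum c && !(['{', '}', '(', ')', '[', ']', ' '].contains c)) then
          result ++ [' ']
        else result
      let inCommand' := if inCommand && !(PySem.Chars.isalpha c) then false else inCommand
      let braceLevel' :=
        if c == '{' then braceLevel + 1 else if c == '}' then braceLevel - 1 else braceLevel
      pvALoop rs (result1 ++ [c]) braceLevel' inCommand'
termination_by rest.length
decreasing_by
  · have := List.length_dropWhile_le PySem.Chars.isalpha rs; simp; omega
  · have := List.length_dropWhile_le PySem.Chars.isalpha rs; simp; omega
  · simp

def process_nested_structures_py (latex : String) : String :=
  String.mk (pvALoop latex.toList [] 0 false)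

-- ===== PORT B =====

def pvCompleteB : List (List Char) :=
  ["int".toList, "sum".toList, "prod".toList, "lim".toList, "frac".toList, "sqrt".toList, "in".toList]

-- one iteration of B's `for ch in chunks[1:]` loop; state = (out, swallowed).
-- `next((j for j, c in enumerate(ch) if not c.isalpha()), len(ch))` is findIdx (it returns
-- ch.length when nothing matches, which is exactly the generator's default len(ch));
-- ch[k] under the k < len(ch) guard is List.getD k.
def pvBStep (st : List (List Char) × Bool) (ch : List Char) : List (List Char) × Bool :=
  let out := st.1 ++ [['\\']]
  if st.2 then (out ++ [ch], false)
  else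
    let k := ch.findIdx (fun c => !(PySem.Chars.isalpha c))
    let cmd := ch.take k
    let out := out ++ [cmd]
    if cmd ∈ pvCompleteB then (out ++ [ch.drop k], false)
    else if k < ch.length then
      let out := if PySem.Chars.isdigit (ch.getD k ' ') then out ++ [[' ']] else out
      (out ++ [ch.drop k], false)
    else (out, true)

def process_nested_structures_py_alt (latex : String) : String :=
  let chunks := PySem.Chars.splitOn latex.toList ['\\']
  -- chunks[0]: split always returns a non-empty list, so headD is exact
  let st := (chunks.drop 1).foldl pvBStep ([chunks.headD []], false)
  String.mk (PySem.Chars.join [] st.1)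

-- ===== PRECONDITION & SPEC =====
def Spec_process_nested_structures_py (latex : String) (out : String) : Prop := out = process_nested_structures_py_alt latex
instance (latex : String) (out : String) : Decidable (Spec_process_nested_structures_py latex out) := by unfold Spec_process_nested_structures_py; infer_instance

-- ===== CLAIM (what is proved, stated in full; the proofs are below) =====
def Claim_equal_process_nested_structures_py : Prop := ∀ (latex : String), Dom_process_nested_structures_py latex → Spec_process_nested_structures_py latex (process_nested_structures_py latex)

-- ===== LEMMAS AND PROOFS =====

lemma pvCompleteB_eq : pvCompleteB = pvCompleteA := rfl

-- common functional description both ports are reduced to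
def pvBSpec (cs : List Char) : List Char :=
  match cs with
  | [] => []
  | c :: rs =>
    if c = '\\' then
      let cmd := rs.takeWhile PySem.Chars.isalpha
      let rest' := rs.dropWhile PySem.Chars.isalpha
      if cmd ∈ pvCompleteA then '\\' :: cmd ++ pvBSpec rest'
      else if hre : rest' = [] then '\\' :: cmd
      else
        '\\' :: cmd ++
          (if PySem.Chars.isdigit (rest'.headD ' ') then [' ', rest'.headD ' ']
           else [rest'.headD ' ']) ++ pvBSpec rest'.tail
    else c :: pvBSpec rs
termination_by cs.length
decreasing_by
  · have := List.length_dropWhile_le PySem.Chars.isalpha rs; simp; omega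
  · have h1 := List.length_dropWhile_le PySem.Chars.isalpha rs
    have h2 : (rs.dropWhile PySem.Chars.isalpha).length ≠ 0 := fun e =>
      hre (List.eq_nil_of_length_eq_zero e)
    simp [List.length_tail]; omega
  · simp

-- equation lemmas for pvBSpec
lemma pvBSpec_nil : pvBSpec [] = [] := by rw [pvBSpec.eq_def]

lemma pvBSpec_cons_ne (c : Char) (rs : List Char) (h : c ≠ '\\') :
    pvBSpec (c :: rs) = c :: pvBSpec rs := by
  rw [pvBSpec.eq_def]; simp [h]

lemma pvBSpec_bs_c (rs : List Char) (h : rs.takeWhile PySem.Chars.isalpha ∈ pvCompleteA) :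
    pvBSpec ('\\' :: rs) =
      '\\' :: rs.takeWhile PySem.Chars.isalpha ++ pvBSpec (rs.dropWhile PySem.Chars.isalpha) := by
  rw [pvBSpec.eq_def]; simp [h]

lemma pvBSpec_bs_nc_nil (rs : List Char) (h : rs.takeWhile PySem.Chars.isalpha ∉ pvCompleteA)
    (h2 : rs.dropWhile PySem.Chars.isalpha = []) :
    pvBSpec ('\\' :: rs) = '\\' :: rs.takeWhile PySem.Chars.isalpha := by
  rw [pvBSpec.eq_def]; simp [h, h2]

lemma pvBSpec_bs_nc_cons (rs d : _) (r'' : List Char)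
    (h : rs.takeWhile PySem.Chars.isalpha ∉ pvCompleteA)
    (h2 : rs.dropWhile PySem.Chars.isalpha = d :: r'') :
    pvBSpec ('\\' :: rs) =
      '\\' :: rs.takeWhile PySem.Chars.isalpha ++
        (if PySem.Chars.isdigit d then [' ', d] else [d]) ++ pvBSpec r'' := by
  rw [pvBSpec.eq_def]; simp [h, h2]

-- what A appends once it leaves the in_command state at the head of `rest`
def pvAfter : List Char → List Char
  | [] => []
  | d :: rs => (if PySem.Chars.isdigit d then [' '] else []) ++ d :: pvBSpec rs

-- the space condition of A collapses to isdigit once the char is non-alphabetic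
lemma pvSpaceCond (d : Char) (h : PySem.Chars.isalpha d = false) :
    (PySem.Chars.isalnum d && !(['{', '}', '(', ')', '[', ']', ' '].contains d)) =
      PySem.Chars.isdigit d := by
  by_cases hm : d ∈ ['{', '}', '(', ')', '[', ']', ' ']
  · fin_cases hm <;> decide
  · have hc : (['{', '}', '(', ')', '[', ']', ' '].contains d) = false := by
      simpa using hm
    simp [PySem.Chars.isalnum, h]
    intro hd
    refine ⟨?_, ?_, ?_, ?_, ?_, ?_, ?_⟩ <;> rintro rfl <;> exact absurd hd (by decide)

lemma pvDropWhile_head_not_alpha (l : List Char) :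
    PySem.Chars.isalpha ((l.dropWhile PySem.Chars.isalpha).headD '0') = false := by
  induction l with
  | nil => decide
  | cons c rs ih =>
    by_cases hc : PySem.Chars.isalpha c
    · simpa [List.dropWhile_cons, hc] using ih
    · simp only [List.dropWhile_cons, hc, if_false, List.headD_cons]
      simpa using hc

-- equation lemmas for pvALoop
lemma pvALoop_nil (res : List Char) (b : Int) (ic : Bool) : pvALoop [] res b ic = res := by
  rw [pvALoop.eq_def]

lemma pvALoop_bs_c (rs res : List Char) (b : Int)
    (h : rs.takeWhile PySem.Chars.isalpha ∈ pvCompleteA) :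
    pvALoop ('\\' :: rs) res b false =
      pvALoop (rs.dropWhile PySem.Chars.isalpha)
        (res ++ '\\' :: rs.takeWhile PySem.Chars.isalpha) b false := by
  rw [pvALoop.eq_def]; simp [h]

lemma pvALoop_bs_nc (rs res : List Char) (b : Int)
    (h : rs.takeWhile PySem.Chars.isalpha ∉ pvCompleteA) :
    pvALoop ('\\' :: rs) res b false =
      pvALoop (rs.dropWhile PySem.Chars.isalpha)
        (res ++ '\\' :: rs.takeWhile PySem.Chars.isalpha) b true := by
  rw [pvALoop.eq_def]; simp [h]

lemma pvALoop_plain (c : Char) (rs res : List Char) (b : Int) (h : c ≠ '\\') :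
    pvALoop (c :: rs) res b false =
      pvALoop rs (res ++ [c])
        (if c == '{' then b + 1 else if c == '}' then b - 1 else b) false := by
  rw [pvALoop.eq_def]; simp [h]

lemma pvALoop_true (c : Char) (rs res : List Char) (b : Int)
    (h : PySem.Chars.isalpha c = false) :
    pvALoop (c :: rs) res b true =
      pvALoop rs ((if PySem.Chars.isdigit c then res ++ [' '] else res) ++ [c])
        (if c == '{' then b + 1 else if c == '}' then b - 1 else b) false := by
  rw [pvALoop.eq_def]
  simp only [Bool.not_true, Bool.and_false, Bool.false_eq_true, if_false, h, Bool.not_false,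
    Bool.true_and, Bool.and_true, pvSpaceCond c h]
  split <;> rfl

-- A's loop computes pvBSpec
lemma pvA_loop_eq :
    ∀ (n : Nat) (rest : List Char), rest.length ≤ n →
      (∀ res b, pvALoop rest res b false = res ++ pvBSpec rest) ∧
      (∀ res b, PySem.Chars.isalpha (rest.headD '0') = false →
        pvALoop rest res b true = res ++ pvAfter rest) := by
  intro n
  induction n with
  | zero =>
    intro rest h
    have hr : rest = [] := List.eq_nil_of_length_eq_zero (Nat.le_zero.mp h)
    subst hr
    exact ⟨fun res b => by simp [pvALoop_nil, pvBSpec_nil],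
           fun res b _ => by simp [pvALoop_nil, pvAfter]⟩
  | succ m ih =>
    intro rest hlen
    cases rest with
    | nil =>
      exact ⟨fun res b => by simp [pvALoop_nil, pvBSpec_nil],
             fun res b _ => by simp [pvALoop_nil, pvAfter]⟩
    | cons c rs =>
      have hrs : rs.length ≤ m := by simpa using hlen
      have hdl : (rs.dropWhile PySem.Chars.isalpha).length ≤ m :=
        le_trans (List.length_dropWhile_le _ _) hrs
      constructor
      · intro res b
        by_cases hc : c = '\\'
        · subst hc
          by_cases hcm : rs.takeWhile PySem.Chars.isalpha ∈ pvCompleteA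
          · rw [pvALoop_bs_c rs res b hcm, (ih _ hdl).1, pvBSpec_bs_c rs hcm]
            simp
          · rw [pvALoop_bs_nc rs res b hcm,
                (ih _ hdl).2 _ b (pvDropWhile_head_not_alpha rs)]
            cases hdw : rs.dropWhile PySem.Chars.isalpha with
            | nil => rw [pvBSpec_bs_nc_nil rs hcm hdw]; simp [hdw, pvAfter]
            | cons d r'' =>
              rw [pvBSpec_bs_nc_cons rs d r'' hcm hdw]
              simp only [hdw, pvAfter]
              by_cases hd : PySem.Chars.isdigit d <;> simp [hd]
        · rw [pvALoop_plain c rs res b hc, (ih _ hrs).1, pvBSpec_cons_ne c rs hc]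
          simp
      · intro res b hhead
        have hh : PySem.Chars.isalpha c = false := by simpa using hhead
        rw [pvALoop_true c rs res b hh, (ih _ hrs).1]
        simp only [pvAfter]
        by_cases hd : PySem.Chars.isdigit c <;> simp [hd]

-- ----- split characterization -----

def pvSplit : List Char → List (List Char)
  | [] => [[]]
  | c :: rest => if c = '\\' then [] :: pvSplit rest else (pvSplit rest).modifyHead (c :: ·)

lemma pvSplit_nil : pvSplit [] = [[]] := rfl

lemma pvSplit_bs (rest : List Char) : pvSplit ('\\' :: rest) = [] :: pvSplit rest := by
  simp [pvSplit]

lemma pvSplit_cons (c : Char) (rest : List Char) (h : c ≠ '\\') :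
    pvSplit (c :: rest) = (pvSplit rest).modifyHead (c :: ·) := by
  simp [pvSplit, h]

lemma pvGo_spec :
    ∀ (fuel : Nat) (l cur : List Char) (acc : List (List Char)), l.length < fuel →
      PySem.Chars.splitOn.go ['\\'] fuel l cur acc =
        acc.reverse ++ (pvSplit l).modifyHead (cur.reverse ++ ·) := by
  intro fuel
  induction fuel with
  | zero => intro l cur acc h; exact absurd h (Nat.not_lt_zero _)
  | succ f ih =>
    intro l cur acc h
    cases l with
    | nil => simp [PySem.Chars.splitOn.go, pvSplit, List.modifyHead]
    | cons c rest =>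
      have hrf : rest.length < f := by simpa using Nat.lt_of_succ_lt_succ h
      by_cases hc : c = '\\'
      · subst hc
        have hstep : PySem.Chars.splitOn.go ['\\'] (f + 1) ('\\' :: rest) cur acc =
            PySem.Chars.splitOn.go ['\\'] f rest [] (cur.reverse :: acc) := by
          simp [PySem.Chars.splitOn.go, List.isPrefixOf]
        rw [hstep, ih rest [] (cur.reverse :: acc) hrf]
        simp only [pvSplit, if_pos rfl, List.reverse_cons, List.reverse_nil, List.modifyHead_cons]
        cases hps : pvSplit rest <;> simp [List.modifyHead]
      · have hstep : PySem.Chars.splitOn.go ['\\'] (f + 1) (c :: rest) cur acc =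
            PySem.Chars.splitOn.go ['\\'] f rest (c :: cur) acc := by
          simp [PySem.Chars.splitOn.go, List.isPrefixOf, hc]
          intro habs; exact absurd habs.symm hc
        rw [hstep, ih rest (c :: cur) acc hrf]
        simp only [pvSplit, hc, if_false, List.reverse_cons]
        cases hps : pvSplit rest <;> simp [List.modifyHead]
      done

lemma pvSplitOn_eq (cs : List Char) : PySem.Chars.splitOn cs ['\\'] = pvSplit cs := by
  have h : PySem.Chars.splitOn cs ['\\'] =
      PySem.Chars.splitOn.go ['\\'] (cs.length + 1) cs [] [] := rfl
  rw [h, pvGo_spec _ _ _ _ (Nat.lt_succ_self _)]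
  cases hps : pvSplit cs <;> simp [List.modifyHead]

lemma pvSplit_eq_form (cs : List Char) :
    pvSplit cs = cs.takeWhile (fun c => c != '\\') ::
      (match cs.dropWhile (fun c => c != '\\') with
       | [] => []
       | _ :: r => pvSplit r) := by
  induction cs with
  | nil => simp [pvSplit]
  | cons c rest ih =>
    by_cases hc : c = '\\'
    · subst hc; simp [pvSplit, List.takeWhile_cons, List.dropWhile_cons]
    · have hb : (c != '\\') = true := by simpa using hc
      simp only [pvSplit, hc, if_false, List.takeWhile_cons, List.dropWhile_cons, hb, if_true, ih,
        List.modifyHead_cons]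

-- ----- the fold of B flattened -----

def pvG : List (List Char) → Bool → List Char
  | [], _ => []
  | ch :: chunks, sw =>
    if sw then '\\' :: ch ++ pvG chunks false
    else
      let k := ch.findIdx (fun c => !(PySem.Chars.isalpha c))
      let cmd := ch.take k
      if cmd ∈ pvCompleteA then '\\' :: cmd ++ ch.drop k ++ pvG chunks false
      else if k < ch.length then
        '\\' :: cmd ++ (if PySem.Chars.isdigit (ch.getD k ' ') then [' '] else []) ++
          ch.drop k ++ pvG chunks false
      else '\\' :: cmd ++ pvG chunks true

lemma pvBStep_shape (out : List (List Char)) (sw : Bool) (ch : List Char) :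
    (pvBStep (out, sw) ch).1 = out ++ (pvBStep ([], sw) ch).1 ∧
      (pvBStep (out, sw) ch).2 = (pvBStep ([], sw) ch).2 := by
  simp only [pvBStep]; split_ifs <;> simp

lemma pvG_cons (ch : List Char) (t : List (List Char)) (sw : Bool) :
    pvG (ch :: t) sw = ((pvBStep ([], sw) ch).1).flatten ++ pvG t (pvBStep ([], sw) ch).2 := by
  simp only [pvBStep, pvG, pvCompleteB_eq]
  split_ifs <;> simp

lemma pvFold_flatten :
    ∀ (chunks out : List (List Char)) (sw : Bool),
      ((chunks.foldl pvBStep (out, sw)).1).flatten = out.flatten ++ pvG chunks sw := by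
  intro chunks
  induction chunks with
  | nil => intro out sw; simp [pvG]
  | cons ch t ih =>
    intro out sw
    obtain ⟨h1, h2⟩ := pvBStep_shape out sw ch
    have hp : pvBStep (out, sw) ch =
        (out ++ (pvBStep ([], sw) ch).1, (pvBStep ([], sw) ch).2) := Prod.ext h1 h2
    rw [List.foldl_cons, hp, ih, pvG_cons]
    simp

lemma pvJoin_nil_flatten : ∀ xs : List (List Char), PySem.Chars.join [] xs = xs.flatten := by
  intro xs
  induction xs with
  | nil => simp [PySem.Chars.join_nil]
  | cons a t ih =>
    cases t with
    | nil => simp [PySem.Chars.join_singleton]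
    | cons b t' => rw [PySem.Chars.join_cons_cons]; simp [ih]

-- ----- pvBSpec facts -----

lemma pvBSpec_append (pre l : List Char) (h : '\\' ∉ pre) :
    pvBSpec (pre ++ l) = pre ++ pvBSpec l := by
  induction pre with
  | nil => simp
  | cons c p ih =>
    have hc : c ≠ '\\' := fun e => h (e ▸ List.mem_cons_self ..)
    have hp : '\\' ∉ p := fun e => h (List.mem_cons_of_mem _ e)
    rw [List.cons_append, pvBSpec_cons_ne _ _ hc, ih hp]
    simp

-- dropWhile as a drop at the first failing index
lemma pvDropWhile_eq_drop {α : Type} (p : α → Bool) (l : List α) :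
    l.dropWhile p = l.drop (l.findIdx fun a => !p a) := by
  induction l with
  | nil => simp
  | cons c rest ih =>
    by_cases hc : p c
    · simp [List.dropWhile_cons, List.findIdx_cons, hc, ih]
    · simp [List.dropWhile_cons, List.findIdx_cons, hc]

lemma pvDropWhile_head_false {α : Type} (p : α → Bool) :
    ∀ (l : List α) (x : α) (r : List α), l.dropWhile p = x :: r → p x = false := by
  intro l
  induction l with
  | nil => intro x r h; simp at h
  | cons c rest ih =>
    intro x r h
    by_cases hc : p c
    · exact ih x r (by simpa [List.dropWhile_cons, hc] using h)
    · rw [List.dropWhile_cons, if_neg hc] at h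
      cases h; simpa using hc

-- ----- the chunk fold computes pvBSpec -----

-- equation lemmas for pvG
lemma pvG_nil (sw : Bool) : pvG [] sw = [] := rfl

lemma pvG_sw (ch : List Char) (t : List (List Char)) :
    pvG (ch :: t) true = '\\' :: ch ++ pvG t false := by simp [pvG]

lemma pvG_c (ch : List Char) (t : List (List Char))
    (h : ch.take (ch.findIdx fun c => !(PySem.Chars.isalpha c)) ∈ pvCompleteA) :
    pvG (ch :: t) false =
      '\\' :: ch.take (ch.findIdx fun c => !(PySem.Chars.isalpha c)) ++
        ch.drop (ch.findIdx fun c => !(PySem.Chars.isalpha c)) ++ pvG t false := by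
  simp [pvG, h]

lemma pvG_mid (ch : List Char) (t : List (List Char))
    (h : ch.take (ch.findIdx fun c => !(PySem.Chars.isalpha c)) ∉ pvCompleteA)
    (hk : (ch.findIdx fun c => !(PySem.Chars.isalpha c)) < ch.length) :
    pvG (ch :: t) false =
      '\\' :: ch.take (ch.findIdx fun c => !(PySem.Chars.isalpha c)) ++
        (if PySem.Chars.isdigit (ch.getD (ch.findIdx fun c => !(PySem.Chars.isalpha c)) ' ')
         then [' '] else []) ++
        ch.drop (ch.findIdx fun c => !(PySem.Chars.isalpha c)) ++ pvG t false := by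
  simp [pvG, h, hk]

lemma pvG_end (ch : List Char) (t : List (List Char))
    (h : ch.take (ch.findIdx fun c => !(PySem.Chars.isalpha c)) ∉ pvCompleteA)
    (hk : ¬ (ch.findIdx fun c => !(PySem.Chars.isalpha c)) < ch.length) :
    pvG (ch :: t) false =
      '\\' :: ch.take (ch.findIdx fun c => !(PySem.Chars.isalpha c)) ++ pvG t true := by
  simp [pvG, h, hk]

-- no backslash means pvBSpec is the identity
lemma pvBSpec_nb (l : List Char) (h : '\\' ∉ l) : pvBSpec l = l := by
  simpa [pvBSpec_nil] using pvBSpec_append l [] h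

lemma pvMain :
    ∀ (n : Nat) (cs : List Char), cs.length ≤ n →
      (pvSplit cs).headD [] ++ pvG ((pvSplit cs).drop 1) false = pvBSpec cs := by
  intro n
  induction n with
  | zero =>
    intro cs h
    have : cs = [] := List.eq_nil_of_length_eq_zero (Nat.le_zero.mp h)
    subst this; simp [pvSplit_nil, pvG_nil, pvBSpec_nil]
  | succ m ih =>
    intro cs hlen
    cases cs with
    | nil => simp [pvSplit_nil, pvG_nil, pvBSpec_nil]
    | cons c rest =>
      have hrm : rest.length ≤ m := by simpa using hlen
      by_cases hc : c = '\\'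
      case neg =>
        have ihr := ih rest hrm
        rw [pvSplit_eq_form rest] at ihr
        simp only [List.headD_cons, List.drop_one, List.tail_cons] at ihr
        rw [pvSplit_cons c rest hc, pvSplit_eq_form rest, List.modifyHead_cons,
          pvBSpec_cons_ne c rest hc]
        simp only [List.headD_cons, List.drop_one, List.tail_cons]
        rw [List.cons_append, ihr]
      case pos =>
        subst hc
        rw [pvSplit_bs rest]
        simp only [List.headD_cons, List.drop_one, List.tail_cons, List.nil_append]
        rw [pvSplit_eq_form rest]
        have hmemh' : '\\' ∉ rest.takeWhile (fun c : Char => c != '\\') := by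
          intro hm
          have := List.mem_takeWhile_imp hm
          simp at this
        cases hsd : rest.dropWhile (fun c : Char => c != '\\') with
        | nil =>
          -- the whole rest is backslash-free: a single chunk
          have hrest : rest.takeWhile (fun c : Char => c != '\\') = rest := by
            have h0 : rest.takeWhile (fun c : Char => c != '\\') ++
                rest.dropWhile (fun c : Char => c != '\\') = rest :=
              List.takeWhile_append_dropWhile
            rw [hsd] at h0; simpa using h0
          rw [hrest]
          have hnb : '\\' ∉ rest := hrest ▸ hmemh'
          have hkle : rest.findIdx (fun c => !(PySem.Chars.isalpha c)) ≤ rest.length :=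
            List.findIdx_le_length
          have htw : rest.takeWhile PySem.Chars.isalpha =
              rest.take (rest.findIdx fun c => !(PySem.Chars.isalpha c)) :=
            List.takeWhile_eq_take_findIdx_not
          have hdw : rest.dropWhile PySem.Chars.isalpha =
              rest.drop (rest.findIdx fun c => !(PySem.Chars.isalpha c)) :=
            pvDropWhile_eq_drop _ _
          have hnb_drop : ∀ j, '\\' ∉ rest.drop j := fun j hm => hnb (List.mem_of_mem_drop hm)
          by_cases hcm :
              rest.take (rest.findIdx fun c => !(PySem.Chars.isalpha c)) ∈ pvCompleteA
          · rw [pvG_c rest [] hcm, pvBSpec_bs_c rest (by rw [htw]; exact hcm), htw, hdw,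
              pvBSpec_nb _ (hnb_drop _), pvG_nil]
            simp
          · by_cases hkl : (rest.findIdx fun c => !(PySem.Chars.isalpha c)) < rest.length
            · have hd := List.drop_eq_getElem_cons hkl
              have hgd := List.getD_eq_getElem rest ' ' hkl
              have harm : rest.dropWhile PySem.Chars.isalpha =
                  rest[rest.findIdx fun c => !(PySem.Chars.isalpha c)] ::
                    rest.drop ((rest.findIdx fun c => !(PySem.Chars.isalpha c)) + 1) := by
                rw [hdw, hd]
              rw [pvG_mid rest [] hcm hkl, pvBSpec_bs_nc_cons rest _ _
                  (by rw [htw]; exact hcm) harm, htw, hgd,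
                pvBSpec_nb _ (hnb_drop _), hd, pvG_nil]
              by_cases hdig :
                  PySem.Chars.isdigit rest[rest.findIdx fun c => !(PySem.Chars.isalpha c)] <;>
                simp [hdig]
            · have hkeq : (rest.findIdx fun c => !(PySem.Chars.isalpha c)) = rest.length :=
                le_antisymm hkle (le_of_not_gt hkl)
              rw [pvG_end rest [] hcm hkl, pvBSpec_bs_nc_nil rest (by rw [htw]; exact hcm)
                  (by rw [hdw, hkeq]; simp), htw, hkeq, pvG_nil]
              simp
        | cons x r₂ =>
          have hx : x = '\\' := by
            have := pvDropWhile_head_false _ rest x r₂ hsd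
            simpa using this
          subst hx
          have hrest : rest.takeWhile (fun c : Char => c != '\\') ++ '\\' :: r₂ = rest := by
            have h0 : rest.takeWhile (fun c : Char => c != '\\') ++
                rest.dropWhile (fun c : Char => c != '\\') = rest :=
              List.takeWhile_append_dropWhile
            rw [hsd] at h0; exact h0
          have hlr2 : r₂.length < rest.length := by
            conv_rhs => rw [← hrest]
            simp
            omega
          have hnalpha : PySem.Chars.isalpha '\\' = false := by decide
          have hkle : (rest.takeWhile (fun c : Char => c != '\\')).findIdx
              (fun c => !(PySem.Chars.isalpha c)) ≤
              (rest.takeWhile (fun c : Char => c != '\\')).length :=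
            List.findIdx_le_length
          have htw : (rest.takeWhile (fun c : Char => c != '\\')).takeWhile PySem.Chars.isalpha =
              (rest.takeWhile (fun c : Char => c != '\\')).take
                ((rest.takeWhile (fun c : Char => c != '\\')).findIdx
                  fun c => !(PySem.Chars.isalpha c)) :=
            List.takeWhile_eq_take_findIdx_not
          have hdw : (rest.takeWhile (fun c : Char => c != '\\')).dropWhile PySem.Chars.isalpha =
              (rest.takeWhile (fun c : Char => c != '\\')).drop
                ((rest.takeWhile (fun c : Char => c != '\\')).findIdx
                  fun c => !(PySem.Chars.isalpha c)) :=
            pvDropWhile_eq_drop _ _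
          have hnb_drop : ∀ j, '\\' ∉ (rest.takeWhile (fun c : Char => c != '\\')).drop j :=
            fun j hm => hmemh' (List.mem_of_mem_drop hm)
          have hcmdR : rest.takeWhile PySem.Chars.isalpha =
              (rest.takeWhile (fun c : Char => c != '\\')).take
                ((rest.takeWhile (fun c : Char => c != '\\')).findIdx
                  fun c => !(PySem.Chars.isalpha c)) := by
            conv_lhs => rw [← hrest]
            rw [List.takeWhile_append, htw]
            by_cases hkl : ((rest.takeWhile (fun c : Char => c != '\\')).findIdx
                fun c => !(PySem.Chars.isalpha c)) =
                (rest.takeWhile (fun c : Char => c != '\\')).length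
            · rw [if_pos (by simp [List.length_take, hkl])]
              simp [List.takeWhile_cons, hnalpha, hkl, List.take_length]
            · rw [if_neg fun hE => hkl (le_antisymm hkle (by
                rw [List.length_take] at hE; omega))]
          have hrestR : rest.dropWhile PySem.Chars.isalpha =
              (rest.takeWhile (fun c : Char => c != '\\')).drop
                ((rest.takeWhile (fun c : Char => c != '\\')).findIdx
                  fun c => !(PySem.Chars.isalpha c)) ++ '\\' :: r₂ := by
            conv_lhs => rw [← hrest]
            rw [List.dropWhile_append, hdw]
            by_cases hkl : ((rest.takeWhile (fun c : Char => c != '\\')).findIdx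
                fun c => !(PySem.Chars.isalpha c)) =
                (rest.takeWhile (fun c : Char => c != '\\')).length
            · rw [if_pos (by simp [hkl])]
              simp [List.dropWhile_cons, hnalpha, hkl]
            · rw [if_neg fun hE => hkl (le_antisymm hkle (by
                simp only [List.isEmpty_iff, List.drop_eq_nil_iff] at hE; omega))]
          have htailF : pvG (pvSplit r₂) false = pvBSpec ('\\' :: r₂) := by
            have ih2 := ih ('\\' :: r₂) (by simp; omega)
            rw [pvSplit_bs r₂] at ih2
            simpa using ih2
          by_cases hcm : (rest.takeWhile (fun c : Char => c != '\\')).take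
              ((rest.takeWhile (fun c : Char => c != '\\')).findIdx
                fun c => !(PySem.Chars.isalpha c)) ∈ pvCompleteA
          · rw [pvG_c _ _ hcm, pvBSpec_bs_c rest (by rw [hcmdR]; exact hcm), hcmdR, hrestR,
              pvBSpec_append _ _ (hnb_drop _), htailF]
            simp only [List.cons_append, List.append_assoc]
            try rw [← List.append_assoc]
            try rw [List.take_append_drop]
          · by_cases hkl : ((rest.takeWhile (fun c : Char => c != '\\')).findIdx
                fun c => !(PySem.Chars.isalpha c)) <
                (rest.takeWhile (fun c : Char => c != '\\')).length
            · have hd := List.drop_eq_getElem_cons hkl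
              have hgd := List.getD_eq_getElem (rest.takeWhile (fun c : Char => c != '\\')) ' ' hkl
              have harm : rest.dropWhile PySem.Chars.isalpha =
                  (rest.takeWhile (fun c : Char => c != '\\'))[
                    (rest.takeWhile (fun c : Char => c != '\\')).findIdx
                      fun c => !(PySem.Chars.isalpha c)] ::
                    ((rest.takeWhile (fun c : Char => c != '\\')).drop
                      (((rest.takeWhile (fun c : Char => c != '\\')).findIdx
                        fun c => !(PySem.Chars.isalpha c)) + 1) ++ '\\' :: r₂) := by
                rw [hrestR, hd, List.cons_append]
              rw [pvG_mid _ _ hcm hkl, pvBSpec_bs_nc_cons rest _ _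
                  (by rw [hcmdR]; exact hcm) harm, hcmdR, hgd,
                pvBSpec_append _ _ (hnb_drop _), hd, htailF]
              by_cases hdig : PySem.Chars.isdigit
                  (rest.takeWhile (fun c : Char => c != '\\'))[
                    (rest.takeWhile (fun c : Char => c != '\\')).findIdx
                      fun c => !(PySem.Chars.isalpha c)] <;>
                simp only [hdig, if_true, if_false, Bool.false_eq_true, List.cons_append,
                  List.append_assoc, List.nil_append, List.singleton_append] <;> rfl
            · have hkeq : ((rest.takeWhile (fun c : Char => c != '\\')).findIdx
                  fun c => !(PySem.Chars.isalpha c)) =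
                  (rest.takeWhile (fun c : Char => c != '\\')).length :=
                le_antisymm hkle (le_of_not_gt hkl)
              have harm : rest.dropWhile PySem.Chars.isalpha = '\\' :: r₂ := by
                rw [hrestR, hkeq]; simp
              have hGt : pvG (pvSplit r₂) true = '\\' :: pvBSpec r₂ := by
                have ih2 := ih r₂ (by omega)
                rw [pvSplit_eq_form r₂] at ih2
                simp only [List.headD_cons, List.drop_one, List.tail_cons] at ih2
                rw [pvSplit_eq_form r₂, pvG_sw, List.cons_append, ih2]
              rw [pvG_end _ _ hcm hkl, pvBSpec_bs_nc_cons rest _ _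
                  (by rw [hcmdR]; exact hcm) harm, hcmdR, hGt]
              have hnd : PySem.Chars.isdigit '\\' = false := by decide
              simp [hnd]

-- ===== VERDICT (by name: the statement is the Claim_ definition above) =====
theorem process_nested_structures_py_spec : Claim_equal_process_nested_structures_py := by
  intro latex _
  unfold Spec_process_nested_structures_py
  unfold process_nested_structures_py process_nested_structures_py_alt
  have hA := (pvA_loop_eq latex.toList.length latex.toList le_rfl).1 [] 0
  have hB : PySem.Chars.join []
      (((PySem.Chars.splitOn latex.toList ['\\']).drop 1).foldl pvBStep
        ([(PySem.Chars.splitOn latex.toList ['\\']).headD []], false)).1 =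
      pvBSpec latex.toList := by
    rw [pvJoin_nil_flatten, pvFold_flatten, pvSplitOn_eq]
    simpa using pvMain latex.toList.length latex.toList le_rfl
  simp only [hA, List.nil_append]
  rw [hB]
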